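-- pv_equiv track=rewrite | github.com/tomekrzymyszkiewicz/advent-of-code-2023 | day14/task1.py | rock_column_weights
-- ===== SOURCE A (Python) =====
-- def rock_column_weights(rock_column: str):
--     i = len(rock_column)
--     while len(rock_column):
--         try:
--             next_cube_rock = rock_column.index("#")
--             substring, rock_column = (
--                 rock_column[:next_cube_rock],
--                 rock_column[next_cube_rock + 1 :],
--             )
--         except:
--             substring, rock_column = rock_column, []
--         weight = sum(range(i - substring.count("O") + 1, i + 1))
--         i -= len(substring) + 1
--         yield weight
-- ===== SOURCE B (Python) =====
-- def rock_column_weights(rock_column: str):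
--     segments = rock_column.split('#')
--     if segments[-1] == '':
--         segments.pop()
--     i = len(rock_column)
--     for seg in segments:
--         c = seg.count('O')
--         yield c * (2 * i - c + 1) // 2
--         i -= len(seg) + 1
-- ===== Notes on version B (the rewrite author's own statement) =====
-- stated objective: idiomatic
-- what changed: Replaces A's repeated index/slice/rebind while-loop and its sum(range(...)) inner loop by a single str.split on the wall character (dropping the one trailing empty segment, which A's loop never reaches) and a closed-form weight c*(2*i-c+1)//2 per segment.
import Mathlib
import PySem

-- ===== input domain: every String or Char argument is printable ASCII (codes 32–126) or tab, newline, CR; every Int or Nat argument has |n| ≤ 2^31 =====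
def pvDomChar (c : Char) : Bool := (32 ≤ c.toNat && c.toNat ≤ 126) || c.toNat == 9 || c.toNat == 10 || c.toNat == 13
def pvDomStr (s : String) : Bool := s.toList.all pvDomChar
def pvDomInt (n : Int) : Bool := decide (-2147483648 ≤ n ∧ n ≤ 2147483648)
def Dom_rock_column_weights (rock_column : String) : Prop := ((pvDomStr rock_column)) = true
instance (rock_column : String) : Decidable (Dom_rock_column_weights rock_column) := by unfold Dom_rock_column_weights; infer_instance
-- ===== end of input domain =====

-- B replaces A's repeated index/slice while-loop and sum(range(...)) by one str.split on the wall character plus a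
-- closed-form weight per segment (idiomatic decomposition); equivalence of the generators' yielded lists.

-- ===== PORT A =====
-- A's while-loop: each iteration finds the next '#' (try str.index, except → last chunk),
-- yields sum(range(i - count + 1, i + 1)) and updates i.
def pvWeightsA (cs : List Char) (i : Int) : List Int :=
  if _hcs : cs = [] then []
  else
    match PySem.List.index? cs '#' with
    | some n =>
        (PySem.List.pyRange (i - (PySem.List.count (cs.take n) 'O' : Int) + 1) (i + 1) 1).sum
          :: pvWeightsA (cs.drop (n + 1)) (i - ((cs.take n).length + 1))
    | none =>
        [(PySem.List.pyRange (i - (PySem.List.count cs 'O' : Int) + 1) (i + 1) 1).sum]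
termination_by cs.length
decreasing_by
  have h0 : 0 < cs.length := List.length_pos_iff.mpr _hcs
  simp only [List.length_drop]; omega

def rock_column_weights (rock_column : String) : List Int :=
  pvWeightsA rock_column.toList (rock_column.toList.length : Int)

-- ===== PORT B =====
-- Source B: segments = rock_column.split('#'); if segments[-1] == '': segments.pop()
def pvDropTrailingEmpty (segs : List (List Char)) : List (List Char) :=
  if segs.getLast? = some ([] : List Char) then segs.dropLast else segs

-- Source B's for-loop over the segments with the closed-form weight c*(2*i-c+1)//2
def pvWeightsB : List (List Char) → Int → List Int
  | [], _ => []
  | seg :: rest, i =>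
      let c : Int := (PySem.List.count seg 'O' : Int)
      PySem.Int.floordiv (c * (2 * i - c + 1)) 2 :: pvWeightsB rest (i - (seg.length + 1))

def rock_column_weights_alt (rock_column : String) : List Int :=
  pvWeightsB (pvDropTrailingEmpty (rock_column.toList.splitOn '#'))
    (rock_column.toList.length : Int)

-- ===== PRECONDITION & SPEC =====
def Spec_rock_column_weights (rock_column : String) (out : List Int) : Prop := out = rock_column_weights_alt rock_column
instance (rock_column : String) (out : List Int) : Decidable (Spec_rock_column_weights rock_column out) := by unfold Spec_rock_column_weights; infer_instance

-- ===== CLAIM (what is proved, stated in full; the proofs are below) =====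
def Claim_equal_rock_column_weights : Prop := ∀ (rock_column : String), Dom_rock_column_weights rock_column → Spec_rock_column_weights rock_column (rock_column_weights rock_column)

-- ===== LEMMAS AND PROOFS =====

theorem pv_two_mul_sum (c : Nat) (i : Int) :
    2 * (PySem.List.pyRange (i - c + 1) (i + 1) 1).sum = c * (2 * i - c + 1) := by
  induction c generalizing i with
  | zero =>
      simp only [Nat.cast_zero, sub_zero]
      rw [PySem.List.pyRange_one_eq_nil (le_refl _)]
      simp
  | succ c ih =>
      have hlo : i - ((c + 1 : Nat) : Int) + 1 = i - c := by push_cast; ring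
      rw [hlo, PySem.List.pyRange_one_cons (by omega), List.sum_cons]
      have h := ih i
      push_cast
      linear_combination h

theorem pv_weight_eq (c : Nat) (i : Int) :
    (PySem.List.pyRange (i - c + 1) (i + 1) 1).sum
      = PySem.Int.floordiv ((c : Int) * (2 * i - c + 1)) 2 := by
  have h := pv_two_mul_sum c i
  rw [← h, PySem.Int.floordiv_eq_ediv_of_pos (by norm_num)]
  omega

theorem pv_dte_cons (a : List Char) (l : List (List Char)) (hl : l ≠ []) :
    pvDropTrailingEmpty (a :: l) = a :: pvDropTrailingEmpty l := by
  obtain ⟨b, t, rfl⟩ : ∃ b t, l = b :: t := by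
    cases l with
    | nil => exact absurd rfl hl
    | cons b t => exact ⟨b, t, rfl⟩
  unfold pvDropTrailingEmpty
  rw [List.getLast?_cons_cons]
  split_ifs with h
  · rw [List.dropLast_cons₂]
  · rfl

theorem pv_main (cs : List Char) (i : Int) :
    pvWeightsA cs i = pvWeightsB (pvDropTrailingEmpty (cs.splitOn '#')) i := by
  induction hn : cs.length using Nat.strong_induction_on generalizing cs i with
  | _ n ih =>
  subst hn
  by_cases hcs : cs = []
  · subst hcs
    rw [pvWeightsA]
    simp [List.splitOn, List.splitOnP_nil, pvDropTrailingEmpty, pvWeightsB]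
  · cases hidx : PySem.List.index? cs '#' with
    | none =>
        have hmem : '#' ∉ cs := (PySem.List.index?_eq_none_iff cs '#').mp hidx
        have hsplit : cs.splitOn '#' = [cs] := by
          apply List.splitOnP_eq_single
          intro x hx
          simp only [beq_iff_eq]
          intro hxe; exact hmem (hxe ▸ hx)
        rw [pvWeightsA]
        simp only [dif_neg hcs, hidx, hsplit]
        have hdte : pvDropTrailingEmpty [cs] = [cs] := by
          unfold pvDropTrailingEmpty
          simp [hcs]
        rw [hdte]
        simp only [pvWeightsB]
        rw [pv_weight_eq]
    | some k =>
        obtain ⟨pre, suf, hcseq, hlen, hpre⟩ := (PySem.List.index?_eq_some_iff cs '#' k).mp hidx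
        have htake : cs.take k = pre := by
          rw [hcseq, ← hlen, List.take_left]
        have hdrop : cs.drop (k + 1) = suf := by
          rw [hcseq, ← hlen,
            show pre.length + 1 = (pre ++ ['#']).length by simp,
            show pre ++ '#' :: suf = (pre ++ ['#']) ++ suf by simp,
            List.drop_left]
        have hsplit : cs.splitOn '#' = pre :: suf.splitOn '#' := by
          rw [hcseq]
          apply List.splitOnP_first
          · intro x hx
            simp only [beq_iff_eq]
            intro hxe; exact hpre (hxe ▸ hx)
          · simp
        rw [pvWeightsA]
        simp only [dif_neg hcs, hidx, hsplit]
        rw [pv_dte_cons pre (suf.splitOn '#') (List.splitOnP_ne_nil _ _), htake, hdrop]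
        simp only [pvWeightsB]
        rw [pv_weight_eq]
        refine congrArg₂ _ rfl ?_
        have hlt : suf.length < cs.length := by
          have : cs.length = pre.length + 1 + suf.length := by
            rw [hcseq]; simp; omega
          omega
        exact ih suf.length hlt suf _ rfl

-- ===== VERDICT (by name: the statement is the Claim_ definition above) =====
theorem rock_column_weights_spec : Claim_equal_rock_column_weights := by
  intro s _
  unfold Spec_rock_column_weights rock_column_weights rock_column_weights_alt
  exact pv_main s.toList (s.toList.length : Int)
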